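-- pv_equiv track=rewrite | github.com/DaddarioLuigi/hsr_backend | controller/controller.py | extract_from_tables
-- ===== SOURCE A (Python) =====
-- def extract_from_tables(tables: list[list[list[str]]]) -> dict:
--     entities: dict[str, str] = {}
--     for table in tables:
--         if not table or len(table) < 2:
--             continue
--         headers = [h.strip() for h in table[0] if h]
--         for row in table[1:]:
--             for header, cell in zip(headers, row):
--                 if header and cell and str(cell).strip():
--                     val = str(cell).strip()
--                     if header in entities:
--                         entities[header] = f"{entities[header]}, {val}"
--                     else:
--                         entities[header] = val
--     return entities
-- ===== SOURCE B (Python) =====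
-- def extract_from_tables(tables: list[list[list[str]]]) -> dict:
--     # Stage 1: flatten every table into one stream of (header, value) pairs.
--     pairs: list[tuple[str, str]] = []
--     for table in tables:
--         if len(table) >= 2:
--             headers = [h.strip() for h in table[0] if h]
--             for row in table[1:]:
--                 pairs.extend((h, c.strip()) for h, c in zip(headers, row)
--                              if h and c.strip())
--     # Stage 2: distinct headers in first-occurrence order, then one scan per
--     # header collecting and joining its values (no dict during aggregation).
--     seen = list(dict.fromkeys(h for h, _ in pairs))
--     return {h: ", ".join(v for k, v in pairs if k == h) for h in seen}
-- ===== Notes on version B (the rewrite author's own statement) =====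
-- stated objective: alternative
-- what changed: B first flattens all tables into a single stream of (header, value) pairs, then builds the result in a second stage: distinct headers via dict.fromkeys and one filtering scan of the stream per header joined with ', ' - no dict or membership branch during the traversal, unlike A's incrementally-updated dict with string concatenation.
import Mathlib
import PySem

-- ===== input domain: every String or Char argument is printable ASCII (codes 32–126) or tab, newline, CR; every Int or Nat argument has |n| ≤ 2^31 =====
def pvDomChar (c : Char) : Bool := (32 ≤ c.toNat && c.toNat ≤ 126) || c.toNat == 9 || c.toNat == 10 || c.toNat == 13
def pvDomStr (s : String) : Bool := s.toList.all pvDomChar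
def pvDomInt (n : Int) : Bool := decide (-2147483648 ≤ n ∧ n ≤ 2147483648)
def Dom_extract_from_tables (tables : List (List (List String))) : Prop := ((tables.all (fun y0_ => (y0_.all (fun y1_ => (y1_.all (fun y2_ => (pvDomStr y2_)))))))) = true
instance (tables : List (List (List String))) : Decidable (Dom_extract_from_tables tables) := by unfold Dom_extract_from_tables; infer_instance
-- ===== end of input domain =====

-- B flattens everything into one stream of (header, value) pairs first, then builds the
-- result in a second stage — distinct headers in first-occurrence order, one filtering
-- scan of the stream per header joined with ", " — instead of A's incrementally updated
-- dict with per-cell membership test and string concatenation (objective: alternative).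

-- ===== PORT A =====
-- per-cell body of A's innermost loop (helper naming only; code is A's)
def acell (e : PySem.Dict String String) (hc : String × String) : PySem.Dict String String :=
  if hc.1 ≠ "" ∧ hc.2 ≠ "" ∧ PySem.Str.strip hc.2 ≠ "" then
    let val := PySem.Str.strip hc.2
    if e.contains hc.1 then e.insert hc.1 (e.getD hc.1 "" ++ ", " ++ val)
    else e.insert hc.1 val
  else e

def extract_from_tables (tables : List (List (List String))) : List (String × String) :=
  (tables.foldl (fun e table =>
    if table = [] ∨ table.length < 2 then e
    else
      let headers := ((PySem.List.pyGetD table 0 []).filter (fun h => h != "")).map PySem.Str.strip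
      (PySem.List.slice table (some 1) none).foldl (fun e row =>
        (headers.zip row).foldl acell e) e)
    PySem.Dict.empty).items

-- ===== PORT B =====
-- the filter/strip of B's inner generator expression (helper naming only; code is B's)
def bpair (hc : String × String) : Option (String × String) :=
  if hc.1 ≠ "" ∧ PySem.Str.strip hc.2 ≠ "" then some (hc.1, PySem.Str.strip hc.2) else none

def extract_from_tables_alt (tables : List (List (List String))) : List (String × String) :=
  let pairs := tables.foldl (fun ps table =>
    if 2 ≤ table.length then
      let headers := ((PySem.List.pyGetD table 0 []).filter (fun h => h != "")).map PySem.Str.strip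
      (PySem.List.slice table (some 1) none).foldl (fun ps row =>
        ps ++ (headers.zip row).filterMap bpair) ps
    else ps) []
  let seen := PySem.List.dedup (pairs.map Prod.fst)
  seen.map (fun h => (h, PySem.Str.join ", " ((pairs.filter (fun p => p.1 == h)).map Prod.snd)))

-- ===== PRECONDITION & SPEC =====
def Spec_extract_from_tables (tables : List (List (List String))) (out : List (String × String)) : Prop := out = extract_from_tables_alt tables
instance (tables : List (List (List String))) (out : List (String × String)) : Decidable (Spec_extract_from_tables tables out) := by unfold Spec_extract_from_tables; infer_instance

-- ===== CLAIM (what is proved, stated in full; the proofs are below) =====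
def Claim_equal_extract_from_tables : Prop := ∀ (tables : List (List (List String))), Dom_extract_from_tables tables → Spec_extract_from_tables tables (extract_from_tables tables)

-- ===== LEMMAS AND PROOFS =====

-- proof-side intermediate: the grouping dict (header → list of values) over the pair stream
def pstep (g : PySem.Dict String (List String)) (p : String × String) : PySem.Dict String (List String) :=
  g.modify p.1 [] (· ++ [p.2])

def bcell (g : PySem.Dict String (List String)) (hc : String × String) : PySem.Dict String (List String) :=
  let val := PySem.Str.strip hc.2
  if hc.1 ≠ "" ∧ val ≠ "" then g.modify hc.1 [] (· ++ [val]) else g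

-- formatting map applied to one accumulated group entry
def joinP (p : String × List String) : String × String := (p.1, PySem.Str.join ", " p.2)

-- invariant tying A's dict to the dict of lists: same entries up to joining,
-- and every accumulated list is nonempty
def DRel (e : PySem.Dict String String) (g : PySem.Dict String (List String)) : Prop :=
  e.items = g.items.map joinP ∧ ∀ p ∈ g.items, p.2 ≠ []

theorem foldl_rel {α β γ : Type} (f : α → γ → α) (f' : β → γ → β)
    (P : α → β → Prop) (h : ∀ c a b, P a b → P (f a c) (f' b c)) :
    ∀ (l : List γ) (a : α) (b : β), P a b → P (l.foldl f a) (l.foldl f' b) := by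
  intro l
  induction l with
  | nil => intro a b hp; exact hp
  | cons x t ih => intro a b hp; exact ih _ _ (h x a b hp)

theorem joinC_snoc (sep x : List Char) :
    ∀ (l : List (List Char)), l ≠ [] →
      PySem.Chars.join sep (l ++ [x]) = PySem.Chars.join sep l ++ sep ++ x := by
  intro l
  induction l with
  | nil => intro h; exact absurd rfl h
  | cons a t ih =>
    intro _
    cases t with
    | nil => simp [PySem.Chars.join, List.intercalate, List.append_assoc]
    | cons b t2 =>
      have h1 : a :: b :: t2 ++ [x] = a :: (b :: (t2 ++ [x])) := by simp
      rw [h1, PySem.Chars.join_cons_cons, show b :: (t2 ++ [x]) = (b :: t2) ++ [x] by simp,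
        ih (by simp), PySem.Chars.join_cons_cons]
      simp [List.append_assoc]

theorem joinV_snoc (vs : List String) (v : String) (h : vs ≠ []) :
    PySem.Str.join ", " (vs ++ [v]) = PySem.Str.join ", " vs ++ ", " ++ v := by
  apply String.toList_injective
  simp only [PySem.Str.join, String.toList_ofList, String.toList_append, List.map_append,
    List.map_cons, List.map_nil]
  rw [joinC_snoc _ _ _ (by simpa using h)]

theorem joinV_single (v : String) : PySem.Str.join ", " [v] = v := by
  simp [PySem.Str.join, PySem.Chars.join, List.intercalate]

theorem contains_rel (e : PySem.Dict String String) (g : PySem.Dict String (List String))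
    (k : String) (hi : e.items = g.items.map joinP) : e.contains k = g.contains k := by
  simp only [PySem.Dict.contains, hi, List.any_map]
  rfl

theorem get?_rel (e : PySem.Dict String String) (g : PySem.Dict String (List String))
    (k : String) (hi : e.items = g.items.map joinP) :
    e.get? k = (g.get? k).map (fun vs => PySem.Str.join ", " vs) := by
  simp only [PySem.Dict.get?, hi, List.find?_map, Option.map_map]
  rfl

theorem cell_rel (hc : String × String) (e : PySem.Dict String String)
    (g : PySem.Dict String (List String)) (hR : DRel e g) : DRel (acell e hc) (bcell g hc) := by
  obtain ⟨hi, hn⟩ := hR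
  unfold acell bcell
  by_cases hcond : hc.1 ≠ "" ∧ PySem.Str.strip hc.2 ≠ ""
  · have hc2 : hc.2 ≠ "" := by
      intro h0
      apply hcond.2
      rw [h0]
      rfl
    rw [if_pos ⟨hcond.1, hc2, hcond.2⟩, if_pos hcond]
    have hcont := contains_rel e g hc.1 hi
    have hget := get?_rel e g hc.1 hi
    by_cases hg : g.contains hc.1 = true
    · have hsome : (g.get? hc.1).isSome := by
        rw [← PySem.Dict.contains_eq_isSome_get?]; exact hg
      obtain ⟨vs, hvs⟩ := Option.isSome_iff_exists.mp hsome
      have hvs_ne : vs ≠ [] := by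
        simp only [PySem.Dict.get?, Option.map_eq_some_iff] at hvs
        obtain ⟨p, hfind, hp2⟩ := hvs
        exact hp2 ▸ hn p (List.mem_of_find?_eq_some hfind)
      have hgetD_e : e.getD hc.1 "" = PySem.Str.join ", " vs := by
        simp [PySem.Dict.getD, hget, hvs]
      have hgetD_g : g.getD hc.1 [] = vs := by simp [PySem.Dict.getD, hvs]
      constructor
      · simp only [PySem.Dict.modify, PySem.Dict.insert, hcont, hg, if_pos, hgetD_e, hgetD_g,
          hi, List.map_map]
        apply List.map_congr_left
        intro p _
        by_cases hph : p.1 == hc.1 <;>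
          simp [joinP, hph, Function.comp, joinV_snoc vs _ hvs_ne]
      · intro p hp
        simp only [PySem.Dict.modify, PySem.Dict.insert, hg, if_pos, hgetD_g,
          List.mem_map] at hp
        obtain ⟨q, hq, hqp⟩ := hp
        by_cases hqh : q.1 == hc.1
        · rw [if_pos hqh] at hqp
          rw [← hqp]
          simp
        · rw [if_neg hqh] at hqp
          exact hqp ▸ hn q hq
    · have hg' : g.contains hc.1 = false := by simpa using hg
      have he' : e.contains hc.1 = false := by rw [hcont]; exact hg'
      have hgetD_g : g.getD hc.1 [] = [] := by
        have : g.get? hc.1 = none := by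
          have := PySem.Dict.contains_eq_isSome_get? (d := g) (k := hc.1)
          rw [hg'] at this
          exact Option.not_isSome_iff_eq_none.mp (by simp [← this])
        simp [PySem.Dict.getD, this]
      constructor
      · simp only [PySem.Dict.modify, PySem.Dict.insert, he', hg', hgetD_g, Bool.false_eq_true,
          if_false, hi, List.map_append]
        simp [joinP, joinV_single]
      · intro p hp
        simp only [PySem.Dict.modify, PySem.Dict.insert, hg', hgetD_g, Bool.false_eq_true,
          if_false, List.mem_append, List.mem_singleton] at hp
        rcases hp with hp | hp
        · exact hn p hp
        · rw [hp]; simp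
  · have hA : ¬(hc.1 ≠ "" ∧ hc.2 ≠ "" ∧ PySem.Str.strip hc.2 ≠ "") := by
      rintro ⟨h1, _, h3⟩; exact hcond ⟨h1, h3⟩
    rw [if_neg hA, if_neg hcond]
    exact ⟨hi, hn⟩

-- a bcell fold over a zipped row IS a pstep fold over the pairs the row contributes
theorem bcell_eq_pstep (l : List (String × String)) :
    ∀ (g : PySem.Dict String (List String)),
      l.foldl bcell g = (l.filterMap bpair).foldl pstep g := by
  induction l with
  | nil => intro g; rfl
  | cons x t ih =>
    intro g
    by_cases hx : x.1 ≠ "" ∧ PySem.Str.strip x.2 ≠ ""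
    · simp only [List.foldl_cons, List.filterMap_cons, bpair, if_pos hx, bcell, pstep, ih]
    · simp only [List.foldl_cons, List.filterMap_cons, bpair, if_neg hx, bcell, ih]

-- named per-table steps of the three folds (A's dict, the grouping dict, B's pair stream)
def astep (e : PySem.Dict String String) (table : List (List String)) : PySem.Dict String String :=
  if table = [] ∨ table.length < 2 then e
  else (PySem.List.slice table (some 1) none).foldl (fun e row =>
    ((((PySem.List.pyGetD table 0 []).filter (fun h => h != "")).map PySem.Str.strip).zip row).foldl acell e) e

def gstep (g : PySem.Dict String (List String)) (table : List (List String)) : PySem.Dict String (List String) :=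
  if table = [] ∨ table.length < 2 then g
  else (PySem.List.slice table (some 1) none).foldl (fun g row =>
    ((((PySem.List.pyGetD table 0 []).filter (fun h => h != "")).map PySem.Str.strip).zip row).foldl bcell g) g

def sstep (ps : List (String × String)) (table : List (List String)) : List (String × String) :=
  if 2 ≤ table.length then
    (PySem.List.slice table (some 1) none).foldl (fun ps row =>
      ps ++ ((((PySem.List.pyGetD table 0 []).filter (fun h => h != "")).map PySem.Str.strip).zip row).filterMap bpair) ps
  else ps

theorem aport_eq (tables : List (List (List String))) :
    extract_from_tables tables = (tables.foldl astep PySem.Dict.empty).items := rfl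

theorem bport_eq (tables : List (List (List String))) :
    extract_from_tables_alt tables =
      (PySem.List.dedup ((tables.foldl sstep []).map Prod.fst)).map
        (fun h => (h, PySem.Str.join ", " (((tables.foldl sstep []).filter (fun p => p.1 == h)).map Prod.snd))) := rfl

theorem table_drel (table : List (List String)) (e : PySem.Dict String String)
    (g : PySem.Dict String (List String)) (hR : DRel e g) : DRel (astep e table) (gstep g table) := by
  unfold astep gstep
  by_cases hlen : table = [] ∨ table.length < 2
  · rw [if_pos hlen, if_pos hlen]; exact hR
  · rw [if_neg hlen, if_neg hlen]
    apply foldl_rel _ _ DRel ?_ _ e g hR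
    intro row e' g' h'
    exact foldl_rel _ _ DRel cell_rel _ e' g' h'

-- relate the triple bcell fold to the pair-stream fold built by B's stage 1
def PRel (g : PySem.Dict String (List String)) (ps : List (String × String)) : Prop :=
  ps.foldl pstep PySem.Dict.empty = g

theorem table_prel (table : List (List String)) (g : PySem.Dict String (List String))
    (ps : List (String × String)) (hR : PRel g ps) : PRel (gstep g table) (sstep ps table) := by
  unfold gstep sstep
  by_cases hlen : table.length < 2
  · rw [if_pos (Or.inr hlen), if_neg (by omega)]; exact hR
  · have hne : ¬(table = [] ∨ table.length < 2) := by
      rintro (h0 | h1)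
      · exact hlen (by rw [h0]; simp)
      · exact hlen h1
    rw [if_neg hne, if_pos (by omega)]
    apply foldl_rel _ _ PRel ?_ _ g ps hR
    intro row g' ps' h'
    unfold PRel at h' ⊢
    rw [List.foldl_append, h', bcell_eq_pstep]

theorem A_eq_pstep_fold (tables : List (List (List String))) :
    extract_from_tables tables =
      ((tables.foldl sstep []).foldl pstep PySem.Dict.empty).items.map joinP := by
  have hD := foldl_rel astep gstep DRel table_drel tables
    PySem.Dict.empty PySem.Dict.empty ⟨rfl, by simp [PySem.Dict.empty]⟩
  have hP := foldl_rel gstep sstep PRel table_prel tables PySem.Dict.empty [] rfl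
  unfold PRel at hP
  rw [aport_eq, hD.1, ← hP]

-- the grouping dict's items, read off pointwise: keys, nodup, getD
theorem items_eq_keys_map (d : PySem.Dict String (List String)) (h : d.keys.Nodup) :
    d.items = d.keys.map (fun k => (k, d.getD k [])) := by
  have hk : d.keys = d.items.map Prod.fst := rfl
  rw [hk, List.map_map]
  conv_lhs => rw [← List.map_id d.items]
  apply List.map_congr_left
  intro p hp
  have := PySem.Dict.getD_of_mem_items (d := d) (k := p.1) (v := p.2) (d0 := []) (by simpa using hp) h
  simp [Function.comp, this]

theorem grouped_items (ps : List (String × String)) :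
    (ps.foldl pstep PySem.Dict.empty).items =
      (PySem.List.dedup (ps.map Prod.fst)).map
        (fun h => (h, (ps.filter (fun p => p.1 == h)).map Prod.snd)) := by
  have hps : ps.foldl pstep PySem.Dict.empty =
      ps.foldl (fun d p => d.modify p.1 [] (· ++ [p.2])) PySem.Dict.empty := rfl
  rw [hps]
  have hkeys : (ps.foldl (fun d p => d.modify p.1 [] (· ++ [p.2])) PySem.Dict.empty).keys
      = PySem.Set.ofList (ps.map Prod.fst) := by
    have := PySem.Dict.keys_foldl_modify_key (l := ps) (key := Prod.fst) (d0 := ([] : List String))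
      (f := fun _ p => (· ++ [p.2])) (d := PySem.Dict.empty)
    simpa [PySem.Dict.keys_empty, PySem.Set.update_nil_left] using this
  have hnd : (ps.foldl (fun d p => d.modify p.1 [] (· ++ [p.2])) PySem.Dict.empty).keys.Nodup := by
    rw [hkeys]; exact PySem.Set.nodup_ofList _
  rw [items_eq_keys_map _ hnd, hkeys]
  have hded : PySem.List.dedup (ps.map Prod.fst) = PySem.Set.ofList (ps.map Prod.fst) := by
    simp [PySem.List.dedup_eq_ofList]
  rw [hded]
  apply List.map_congr_left
  intro k _
  have := PySem.Dict.getD_foldl_modify_append (l := ps) (d := PySem.Dict.empty) (c := k)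
  rw [this]
  simp [PySem.Dict.getD_empty]

-- ===== VERDICT (by name: the statement is the Claim_ definition above) =====
theorem extract_from_tables_spec : Claim_equal_extract_from_tables := by
  intro tables _
  unfold Spec_extract_from_tables
  rw [A_eq_pstep_fold, grouped_items, bport_eq, List.map_map]
  apply List.map_congr_left
  intro k _
  simp [joinP, Function.comp]
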